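-- pv_equiv track=rewrite | github.com/johnesparragoza/summer-2025-REU | app.py | get_faded_prompt
-- ===== SOURCE A (Python) =====
-- def get_faded_prompt(words, fade_level):
--     """Return the narrative with the last `fade_level` words replaced by blanks."""
--     if fade_level == 0:
--         return " ".join(words)
--     faded_words = [
--         word if i < len(words) - fade_level else "___"
--         for i, word in enumerate(words)
--     ]
--     return " ".join(faded_words)
-- ===== SOURCE B (Python) =====
-- def get_faded_prompt(words, fade_level):
--     """Return the narrative with the last `fade_level` words replaced by blanks."""
--     keep = max(len(words) - fade_level, 0)
--     return " ".join(words[:keep] + ["___"] * (len(words) - keep))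
-- ===== Notes on version B (the rewrite author's own statement) =====
-- stated objective: simpler
-- what changed: Replaces the enumerate comprehension with its per-element index comparison (and the fade_level==0 special case) by a clamped prefix slice concatenated with a replicated list of blanks.
import Mathlib
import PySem

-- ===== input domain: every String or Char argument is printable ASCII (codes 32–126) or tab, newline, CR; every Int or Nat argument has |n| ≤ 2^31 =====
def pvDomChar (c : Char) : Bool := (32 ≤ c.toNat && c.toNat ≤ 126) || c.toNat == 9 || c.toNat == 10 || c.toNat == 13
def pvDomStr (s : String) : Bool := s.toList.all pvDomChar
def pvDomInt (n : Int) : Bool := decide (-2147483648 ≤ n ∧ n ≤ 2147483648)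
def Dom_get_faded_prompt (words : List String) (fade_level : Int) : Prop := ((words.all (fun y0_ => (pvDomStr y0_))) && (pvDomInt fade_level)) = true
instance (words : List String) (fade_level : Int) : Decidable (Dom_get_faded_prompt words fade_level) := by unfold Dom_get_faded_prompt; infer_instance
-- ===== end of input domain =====

-- B replaces A's enumerate comprehension (and fade_level==0 special case) with a clamped
-- prefix slice plus replicated blanks; objective: simpler.


-- ===== PORT A =====
def get_faded_prompt (words : List String) (fade_level : Int) : String :=
  if fade_level == 0 then PySem.Str.join " " words
  else
    let faded_words :=
      (PySem.List.enumerate words 0).map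
        (fun p => if p.1 < (words.length : Int) - fade_level then p.2 else "___")
    PySem.Str.join " " faded_words

-- ===== PORT B =====
def get_faded_prompt_alt (words : List String) (fade_level : Int) : String :=
  let keep : Int := max ((words.length : Int) - fade_level) 0
  PySem.Str.join " "
    (PySem.List.slice words none (some keep) ++
     PySem.List.pyRepeat ["___"] ((words.length : Int) - keep))

-- ===== PRECONDITION & SPEC =====
def Spec_get_faded_prompt (words : List String) (fade_level : Int) (out : String) : Prop := out = get_faded_prompt_alt words fade_level
instance (words : List String) (fade_level : Int) (out : String) : Decidable (Spec_get_faded_prompt words fade_level out) := by unfold Spec_get_faded_prompt; infer_instance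

-- ===== CLAIM (what is proved, stated in full; the proofs are below) =====
def Claim_equal_get_faded_prompt : Prop := ∀ (words : List String) (fade_level : Int), Dom_get_faded_prompt words fade_level → Spec_get_faded_prompt words fade_level (get_faded_prompt words fade_level)

-- ===== LEMMAS AND PROOFS =====

-- A's comprehension keeps the indices below c and blanks the rest.
lemma faded_map_eq (xs : List String) (s c : Int) :
    (PySem.List.enumerate xs s).map
        (fun p => if p.1 < c then p.2 else "___")
      = xs.take (c - s).toNat ++ List.replicate (xs.length - (c - s).toNat) "___" := by
  induction xs generalizing s with
  | nil => simp [PySem.List.enumerate_nil]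
  | cons x t ih =>
    rw [PySem.List.enumerate_cons]
    simp only [List.map_cons]
    by_cases h : s < c
    · have h1 : (c - s).toNat = (c - (s + 1)).toNat + 1 := by omega
      simp only [if_pos h, h1, List.take_succ_cons, List.length_cons]
      rw [ih (s + 1)]
      simp [Nat.succ_sub_succ]
    · have h0 : (c - s).toNat = 0 := by omega
      have h0' : (c - (s + 1)).toNat = 0 := by omega
      simp only [if_neg h, h0, List.take_zero, List.length_cons, Nat.sub_zero,
        List.nil_append]
      rw [ih (s + 1), h0']
      simp [List.replicate_succ]

-- ===== VERDICT (by name: the statement is the Claim_ definition above) =====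
theorem get_faded_prompt_spec : Claim_equal_get_faded_prompt := by
  unfold Claim_equal_get_faded_prompt
  intro words fade_level _
  unfold Spec_get_faded_prompt get_faded_prompt get_faded_prompt_alt
  set n : Int := (words.length : Int) with hn
  set keep : Int := max (n - fade_level) 0 with hkeep
  have hkeep0 : 0 ≤ keep := le_max_right _ _
  have hslice : PySem.List.slice words none (some keep) = words.take keep.toNat :=
    PySem.List.slice_to words hkeep0
  have hrep : PySem.List.pyRepeat ["___"] (n - keep)
      = List.replicate (n - keep).toNat "___" := PySem.List.pyRepeat_singleton _ _
  have hfade : (PySem.List.enumerate words 0).map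
      (fun p => if p.1 < n - fade_level then p.2 else "___")
      = words.take (n - fade_level - 0).toNat
        ++ List.replicate (words.length - (n - fade_level - 0).toNat) "___" :=
    faded_map_eq words 0 (n - fade_level)
  have hkt : (n - fade_level - 0).toNat = keep.toNat := by omega
  have hrepn : (n - keep).toNat = words.length - keep.toNat := by omega
  by_cases hf : fade_level = 0
  · subst hf
    have hk : keep.toNat = words.length := by omega
    simp [hslice, hrep, hk, hrepn, List.take_of_length_le]
  · have : (fade_level == 0) = false := by simp [hf]
    simp only [this, hfade, hkt, hslice, hrep, hrepn, if_false, Bool.false_eq_true]
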